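-- pv_equiv track=rewrite | github.com/megalodon-chess/server | src/server.py | best_val
-- ===== SOURCE A (Python) =====
-- def best_val(results, least, greatest):
--     best_score = float("-inf")
--     best = least
--     for i in range(least, greatest+1):
--         sc = score(i, results)
--         if sc > best_score:
--             best_score = sc
--             best = i
--     return best
--
-- def score(val, results):
--     sc = 0
--     for v, win in results:
--         if win:
--             sc -= abs(v-val)
--         else:
--             sc += abs(v-val)
--     return sc
-- ===== SOURCE B (Python) =====
-- def best_val(results, least, greatest):
--     # Maximize the piecewise-linear score over [least, greatest]: the smallest
--     # maximizer is always one of the endpoints or a breakpoint v inside the range,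
--     # so score only those candidates (in increasing order, keep first maximum).
--     if greatest < least:
--         return least
--     cands = sorted({least, greatest, *(v for v, _ in results if least <= v <= greatest)})
--     best = cands[0]
--     best_score = _score(best, results)
--     for c in cands[1:]:
--         sc = _score(c, results)
--         if sc > best_score:
--             best_score = sc
--             best = c
--     return best
--
-- def _score(val, results):
--     return sum(-abs(v - val) if win else abs(v - val) for v, win in results)
-- ===== Notes on version B (the rewrite author's own statement) =====
-- stated objective: alternative
-- what changed: Instead of scoring every integer in [least, greatest], B scores only the candidate points {least, greatest} plus the breakpoints v lying in the range (sorted, first maximum kept), which is where the smallest maximizer of the piecewise-linear score must lie.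
import Mathlib
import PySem

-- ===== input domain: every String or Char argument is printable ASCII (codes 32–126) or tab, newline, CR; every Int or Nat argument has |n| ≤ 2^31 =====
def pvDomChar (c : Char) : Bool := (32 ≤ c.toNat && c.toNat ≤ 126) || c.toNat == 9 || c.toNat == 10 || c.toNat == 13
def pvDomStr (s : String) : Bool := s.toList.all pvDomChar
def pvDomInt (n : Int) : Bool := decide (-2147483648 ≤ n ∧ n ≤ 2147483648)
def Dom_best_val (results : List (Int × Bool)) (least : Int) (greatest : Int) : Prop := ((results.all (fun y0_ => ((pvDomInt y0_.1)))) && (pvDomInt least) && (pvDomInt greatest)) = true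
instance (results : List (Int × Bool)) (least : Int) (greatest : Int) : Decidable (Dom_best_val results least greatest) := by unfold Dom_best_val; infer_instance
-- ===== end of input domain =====

-- B scores only {least, greatest} and the breakpoints v inside the range instead of every
-- integer in [least, greatest] (the smallest maximizer of the piecewise-linear score lies there).

-- ===== PORT A =====
-- score(val, results)
def pvScoreA (val : Int) (results : List (Int × Bool)) : Int :=
  results.foldl (fun sc p =>
    if p.2 then sc - ((p.1 - val).natAbs : Int) else sc + ((p.1 - val).natAbs : Int)) 0

-- float("-inf") is used only as a sentinel best_score that every int exceeds; ported as
-- Option Int with none = -inf (exact: the comparison sc > -inf is always true).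
def best_val (results : List (Int × Bool)) (least : Int) (greatest : Int) : Int :=
  ((PySem.List.pyRange least (greatest + 1) 1).foldl
    (fun (st : Option Int × Int) i =>
      let sc := pvScoreA i results
      match st with
      | (none, _) => (some sc, i)
      | (some bs, b) => if bs < sc then (some sc, i) else (some bs, b))
    (none, least)).2

-- ===== PORT B =====
-- _score(val, results)
def pvScoreB (val : Int) (results : List (Int × Bool)) : Int :=
  (results.map (fun p =>
    if p.2 then -((p.1 - val).natAbs : Int) else ((p.1 - val).natAbs : Int))).sum

def best_val_alt (results : List (Int × Bool)) (least : Int) (greatest : Int) : Int :=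
  if greatest < least then least
  else
    let cands := PySem.List.sorted
      (PySem.Set.ofList (least :: greatest ::
        results.filterMap (fun p =>
          if least ≤ p.1 ∧ p.1 ≤ greatest then some p.1 else none)))
      (fun x => x) false
    match cands with
    | [] => least   -- unreachable (least is in the set); totality guard only
    | c :: rest =>
      (rest.foldl (fun (st : Int × Int) c' =>
        let sc := pvScoreB c' results
        if st.1 < sc then (sc, c') else st) (pvScoreB c results, c)).2

-- ===== PRECONDITION & SPEC =====
def Spec_best_val (results : List (Int × Bool)) (least : Int) (greatest : Int) (out : Int) : Prop := out = best_val_alt results least greatest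
instance (results : List (Int × Bool)) (least : Int) (greatest : Int) (out : Int) : Decidable (Spec_best_val results least greatest out) := by unfold Spec_best_val; infer_instance

-- ===== CLAIM (what is proved, stated in full; the proofs are below) =====
def Claim_equal_best_val : Prop := ∀ (results : List (Int × Bool)) (least : Int) (greatest : Int), Dom_best_val results least greatest → Spec_best_val results least greatest (best_val results least greatest)

-- ===== LEMMAS AND PROOFS =====

-- first maximum of f over a :: l (strict-improvement scan)
def pvPick (f : Int → Int) (a : Int) (l : List Int) : Int :=
  l.foldl (fun b x => if f b < f x then x else b) a

theorem pvScoreB_eq (val : Int) (results : List (Int × Bool)) :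
    pvScoreB val results = pvScoreA val results := by
  have h : ∀ (rs : List (Int × Bool)) (s : Int),
      rs.foldl (fun sc p =>
        if p.2 then sc - ((p.1 - val).natAbs : Int) else sc + ((p.1 - val).natAbs : Int)) s
      = s + (rs.map (fun p =>
        if p.2 then -((p.1 - val).natAbs : Int) else ((p.1 - val).natAbs : Int))).sum := by
    intro rs
    induction rs with
    | nil => intro s; simp
    | cons q t ih =>
      intro s
      rcases q with ⟨v, w⟩
      rw [List.foldl_cons, List.map_cons, List.sum_cons]
      cases w
      · rw [if_neg (by simp), if_neg (by simp), ih]; ring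
      · rw [if_pos rfl, if_pos rfl, ih]; ring
  simpa [pvScoreA, pvScoreB] using (h results 0).symm

theorem pvPick_cons (f : Int → Int) (a x : Int) (l : List Int) :
    pvPick f a (x :: l) = pvPick f (if f a < f x then x else a) l := rfl

theorem pvPick_mem (f : Int → Int) (a : Int) (l : List Int) : pvPick f a l ∈ a :: l := by
  induction l generalizing a with
  | nil => simp [pvPick]
  | cons x t ih =>
    rw [pvPick_cons]
    have h := ih (if f a < f x then x else a)
    by_cases hfx : f a < f x
    · rw [if_pos hfx] at h ⊢
      rcases List.mem_cons.1 h with h | h <;> simp [h]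
    · rw [if_neg hfx] at h ⊢
      rcases List.mem_cons.1 h with h | h <;> simp [h]

theorem pvPick_le (f : Int → Int) (a : Int) (l : List Int) :
    ∀ x ∈ a :: l, f x ≤ f (pvPick f a l) := by
  induction l generalizing a with
  | nil => intro x hx; rcases List.mem_cons.1 hx with h | h <;> simp_all [pvPick]
  | cons x t ih =>
    intro y hy
    rw [pvPick_cons]
    have hb : f a ≤ f (if f a < f x then x else a) ∧ f x ≤ f (if f a < f x then x else a) := by
      by_cases hfx : f a < f x <;> simp [hfx] <;> omega
    have hbp := ih (if f a < f x then x else a) _ (List.mem_cons_self)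
    rcases List.mem_cons.1 hy with h | h
    · subst h; exact le_trans hb.1 hbp
    · rcases List.mem_cons.1 h with h | h
      · subst h; exact le_trans hb.2 hbp
      · exact ih _ y (List.mem_cons_of_mem _ h)

theorem pvPick_first (f : Int → Int) (a : Int) (l : List Int)
    (h : (a :: l).Pairwise (· < ·)) :
    ∀ x ∈ a :: l, x < pvPick f a l → f x < f (pvPick f a l) := by
  induction l generalizing a with
  | nil =>
    intro x hx hlt
    rcases List.mem_cons.1 hx with h' | h'
    · subst h'; simp [pvPick] at hlt
    · simp at h'
  | cons x t ih =>
    have hax : a < x := (List.pairwise_cons.1 h).1 x List.mem_cons_self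
    have hxt : List.Pairwise (· < ·) (x :: t) := (List.pairwise_cons.1 h).2
    have hxt' := List.pairwise_cons.1 hxt
    by_cases hfx : f a < f x
    all_goals intro y hy hlt
    · rw [pvPick_cons, if_pos hfx] at hlt ⊢
      have ihb := ih x hxt
      rcases List.mem_cons.1 hy with rfl | hy'
      · exact lt_of_lt_of_le hfx (pvPick_le f x t x List.mem_cons_self)
      · exact ihb y hy' hlt
    · rw [pvPick_cons, if_neg hfx] at hlt ⊢
      have hpair : List.Pairwise (· < ·) (a :: t) :=
        List.pairwise_cons.2 ⟨fun z hz => lt_trans hax (hxt'.1 z hz), hxt'.2⟩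
      have ihb := ih a hpair
      rcases List.mem_cons.1 hy with rfl | hy'
      · exact ihb y List.mem_cons_self hlt
      · rcases List.mem_cons.1 hy' with rfl | hyt
        · exact lt_of_le_of_lt (not_lt.1 hfx)
            (ihb a List.mem_cons_self (lt_trans hax hlt))
        · exact ihb y (List.mem_cons_of_mem _ hyt) hlt

theorem pvPick_unique (f : Int → Int) (l : List Int) (m m' : Int)
    (hm : m ∈ l) (hm' : m' ∈ l)
    (h1 : ∀ x ∈ l, f x ≤ f m) (h1' : ∀ x ∈ l, f x ≤ f m')
    (h2 : ∀ x ∈ l, x < m → f x < f m) (h2' : ∀ x ∈ l, x < m' → f x < f m') : m = m' := by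
  rcases lt_trichotomy m m' with h | h | h
  · have := h2' m hm h
    have := h1 m' hm'
    omega
  · exact h
  · have := h2 m' hm' h
    have := h1' m hm
    omega

theorem pvConcave (m : Int) (results : List (Int × Bool))
    (h : ∀ p ∈ results, p.1 ≠ m) :
    pvScoreA (m - 1) results + pvScoreA (m + 1) results = 2 * pvScoreA m results := by
  simp only [← pvScoreB_eq]
  induction results with
  | nil => simp [pvScoreB]
  | cons p t ih =>
    have hp : p.1 ≠ m := h p List.mem_cons_self
    have ht := ih (fun q hq => h q (List.mem_cons_of_mem _ hq))
    have hterm : ((p.1 - (m - 1)).natAbs : Int) + ((p.1 - (m + 1)).natAbs : Int)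
        = 2 * ((p.1 - m).natAbs : Int) := by omega
    cases hpw : p.2 <;> simp only [pvScoreB, List.map_cons, List.sum_cons, hpw] at * <;>
      simp only [Bool.false_eq_true, if_false, if_true] <;> linarith

theorem pvFoldA (results : List (Int × Bool)) (l : List Int) (b : Int) :
    l.foldl (fun (st : Option Int × Int) i =>
      let sc := pvScoreA i results
      match st with
      | (none, _) => (some sc, i)
      | (some bs, b) => if bs < sc then (some sc, i) else (some bs, b))
      (some (pvScoreA b results), b)
    = (some (pvScoreA (pvPick (fun i => pvScoreA i results) b l) results),
       pvPick (fun i => pvScoreA i results) b l) := by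
  induction l generalizing b with
  | nil => simp [pvPick]
  | cons x t ih =>
    by_cases hc : pvScoreA b results < pvScoreA x results <;>
      simp [List.foldl_cons, pvPick_cons, hc, ih]

theorem pvFoldB (results : List (Int × Bool)) (l : List Int) (b : Int) :
    l.foldl (fun (st : Int × Int) c' =>
      let sc := pvScoreB c' results
      if st.1 < sc then (sc, c') else st) (pvScoreB b results, b)
    = (pvScoreB (pvPick (fun i => pvScoreB i results) b l) results,
       pvPick (fun i => pvScoreB i results) b l) := by
  induction l generalizing b with
  | nil => simp [pvPick]
  | cons x t ih =>
    by_cases hc : pvScoreB b results < pvScoreB x results <;>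
      simp [List.foldl_cons, pvPick_cons, hc, ih]

-- ===== VERDICT (by name: the statement is the Claim_ definition above) =====
theorem best_val_spec : Claim_equal_best_val := by
  intro results least greatest _
  unfold Spec_best_val
  by_cases hlg : greatest < least
  · simp [best_val, best_val_alt, hlg, PySem.List.pyRange_one_eq_nil (by omega : greatest + 1 ≤ least)]
  · rw [not_lt] at hlg
    have hf : (fun i => pvScoreB i results) = fun i => pvScoreA i results :=
      funext fun i => pvScoreB_eq i results
    set f : Int → Int := fun i => pvScoreA i results with hfdef
    set R' : List Int := PySem.List.pyRange (least + 1) (greatest + 1) 1 with hR'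
    have hR : PySem.List.pyRange least (greatest + 1) 1 = least :: R' :=
      PySem.List.pyRange_one_cons (by omega)
    have hA : best_val results least greatest = pvPick f least R' := by
      rw [best_val, hR, List.foldl_cons]
      exact congrArg Prod.snd (pvFoldA results R' least)
    set m : Int := pvPick f least R' with hm
    have hmemR : ∀ x : Int, x ∈ least :: R' ↔ least ≤ x ∧ x ≤ greatest := by
      intro x
      rw [← hR, PySem.List.mem_pyRange_one]
      omega
    have hpairR : (least :: R').Pairwise (· < ·) := by
      rw [← hR]; exact PySem.List.pairwise_lt_pyRange_one least (greatest + 1)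
    have hmmem : m ∈ least :: R' := pvPick_mem f least R'
    have hub : ∀ x ∈ least :: R', f x ≤ f m := pvPick_le f least R'
    have hfir : ∀ x ∈ least :: R', x < m → f x < f m := pvPick_first f least R' hpairR
    have hmrange : least ≤ m ∧ m ≤ greatest := (hmemR m).1 hmmem
    have hmC0 : m = least ∨ m = greatest ∨ ∃ p ∈ results, p.1 = m := by
      by_contra hc
      have h1 : m ≠ least := fun h => hc (Or.inl h)
      have h2 : m ≠ greatest := fun h => hc (Or.inr (Or.inl h))
      have h3 : ∀ p ∈ results, p.1 ≠ m := fun p hp he => hc (Or.inr (Or.inr ⟨p, hp, he⟩))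
      have e1 : f (m - 1) < f m := hfir (m - 1) ((hmemR _).2 (by omega)) (by omega)
      have e2 : f (m + 1) ≤ f m := hub (m + 1) ((hmemR _).2 (by omega))
      have e3 := pvConcave m results h3
      simp only [hfdef] at e1 e2
      omega
    set base : List Int := least :: greatest ::
        results.filterMap (fun p =>
          if least ≤ p.1 ∧ p.1 ≤ greatest then some p.1 else none) with hbase
    set C : List Int := PySem.List.sorted (PySem.Set.ofList base) (fun x => x) false with hCdef
    have hmemC : ∀ x : Int, x ∈ C ↔ x = least ∨ x = greatest ∨
        (∃ p ∈ results, p.1 = x ∧ least ≤ x ∧ x ≤ greatest) := by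
      intro x
      rw [hCdef, PySem.List.mem_sorted, PySem.Set.mem_ofList, hbase]
      simp only [List.mem_cons, List.mem_filterMap]
      constructor
      · rintro (h | h | ⟨p, hp, hpx⟩)
        · exact Or.inl h
        · exact Or.inr (Or.inl h)
        · refine Or.inr (Or.inr ⟨p, hp, ?_⟩)
          by_cases hcond : least ≤ p.1 ∧ p.1 ≤ greatest
          · rw [if_pos hcond] at hpx
            cases hpx
            exact ⟨rfl, hcond.1, hcond.2⟩
          · rw [if_neg hcond] at hpx; cases hpx
      · rintro (h | h | ⟨p, hp, rfl, hb1, hb2⟩)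
        · exact Or.inl h
        · exact Or.inr (Or.inl h)
        · exact Or.inr (Or.inr ⟨p, hp, by rw [if_pos ⟨hb1, hb2⟩]⟩)
    have hCpair : C.Pairwise (· < ·) := hCdef ▸ PySem.List.sorted_ofList_pairwise_lt base
    have hCsubR : ∀ x ∈ C, x ∈ least :: R' := by
      intro x hx
      rcases (hmemC x).1 hx with rfl | rfl | ⟨p, _, _, hb1, hb2⟩
      · exact (hmemR _).2 (by omega)
      · exact (hmemR _).2 (by omega)
      · exact (hmemR _).2 (by omega)
    have hleastC : least ∈ C := (hmemC least).2 (Or.inl rfl)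
    obtain ⟨c, rest, hC⟩ : ∃ c rest, C = c :: rest := by
      cases hCeq : C with
      | nil => rw [hCeq] at hleastC; cases hleastC
      | cons c rest => exact ⟨c, rest, rfl⟩
    have hmInC : m ∈ C := by
      refine (hmemC m).2 ?_
      rcases hmC0 with h | h | ⟨p, hp, hpm⟩
      · exact Or.inl h
      · exact Or.inr (Or.inl h)
      · exact Or.inr (Or.inr ⟨p, hp, hpm, hmrange.1, hmrange.2⟩)
    have hB : best_val_alt results least greatest = pvPick f c rest := by
      have h1 := congrArg Prod.snd (pvFoldB results rest c)
      rw [hf] at h1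
      rw [best_val_alt, if_neg (by omega), ← hbase, ← hCdef, hC]
      exact h1
    have hCpair' : (c :: rest).Pairwise (· < ·) := hC ▸ hCpair
    have hmain : m = pvPick f c rest := by
      refine pvPick_unique f C m (pvPick f c rest) hmInC (hC ▸ pvPick_mem f c rest)
        (fun x hx => hub x (hCsubR x hx)) ?_ (fun x hx hl => hfir x (hCsubR x hx) hl) ?_
      · rw [hC]; exact pvPick_le f c rest
      · rw [hC]; exact pvPick_first f c rest hCpair'
    rw [hA, hB, hmain]
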